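-- pv_equiv track=rewrite | github.com/skillzfordawin/blib | bLib/helper.py | locate_diffs
-- ===== SOURCE A (Python) =====
-- def locate_diffs(data1, data2):
-- 	f_loc = -1
-- 	l_loc = -1
--
-- 	length = MIN(len(data1), len(data2))
--
-- 	for i in range(0, length):
-- 		if data1[i] != data2[i]:
-- 			if f_loc == -1:
-- 				f_loc = i
-- 			l_loc = i
-- 	return f_loc, l_loc
--
-- def MIN(value_a, value_b):
-- 	if value_a > value_b:
-- 		return value_b
-- 	else:
-- 		return value_a
-- ===== SOURCE B (Python) =====
-- def locate_diffs(data1, data2):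
--     length = min(len(data1), len(data2))
--     f_loc = -1
--     for i in range(0, length):
--         if data1[i] != data2[i]:
--             f_loc = i
--             break
--     l_loc = -1
--     for i in range(length - 1, -1, -1):
--         if data1[i] != data2[i]:
--             l_loc = i
--             break
--     return f_loc, l_loc
-- ===== Notes on version B (the rewrite author's own statement) =====
-- stated objective: alternative
-- what changed: Replaced the single full-length pass that keeps updating both accumulators with two separate early-exit scans: a forward loop that breaks at the first differing index and a backward loop over range(length-1,-1,-1) that breaks at the last differing index.
import Mathlib
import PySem

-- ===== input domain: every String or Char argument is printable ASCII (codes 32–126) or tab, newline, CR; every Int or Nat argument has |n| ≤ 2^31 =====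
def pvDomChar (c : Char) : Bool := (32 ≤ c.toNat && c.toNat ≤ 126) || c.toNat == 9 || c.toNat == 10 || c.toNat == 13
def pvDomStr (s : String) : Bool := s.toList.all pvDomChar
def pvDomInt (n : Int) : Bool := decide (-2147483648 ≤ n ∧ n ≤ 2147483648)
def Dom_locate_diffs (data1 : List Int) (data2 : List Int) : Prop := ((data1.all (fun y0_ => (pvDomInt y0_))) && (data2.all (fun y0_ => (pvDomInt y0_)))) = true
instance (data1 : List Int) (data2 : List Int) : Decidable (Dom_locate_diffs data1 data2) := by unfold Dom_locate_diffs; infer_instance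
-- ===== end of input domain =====

-- B replaces A's single accumulating pass with two early-exit scans (forward for the
-- first differing index, backward for the last); same return value, alternative shape.

-- ===== PORT A =====
-- helper MIN from the module
def pyMIN (value_a : Int) (value_b : Int) : Int :=
  if value_a > value_b then value_b else value_a

def locate_diffs (data1 : List Int) (data2 : List Int) : Int × Int :=
  let length := pyMIN (data1.length : Int) (data2.length : Int)
  (PySem.List.pyRange 0 length 1).foldl
    (fun (st : Int × Int) i =>
      if PySem.List.pyGetD data1 i 0 ≠ PySem.List.pyGetD data2 i 0 then
        ((if st.1 = -1 then i else st.1), i)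
      else st)
    (-1, -1)

-- ===== PORT B =====
-- loop body of Source B's for-with-break: scan an index list, return the first index
-- where the two lists differ, -1 if none (indices here are always in range, so
-- pyGetD with default 0 is exact for Python's data1[i])
def firstDiffScan (data1 : List Int) (data2 : List Int) : List Int → Int
  | [] => -1
  | i :: rest =>
    if PySem.List.pyGetD data1 i 0 ≠ PySem.List.pyGetD data2 i 0 then i
    else firstDiffScan data1 data2 rest

def locate_diffs_alt (data1 : List Int) (data2 : List Int) : Int × Int :=
  let length := min (data1.length : Int) (data2.length : Int)
  let f_loc := firstDiffScan data1 data2 (PySem.List.pyRange 0 length 1)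
  let l_loc := firstDiffScan data1 data2 (PySem.List.pyRange (length - 1) (-1) (-1))
  (f_loc, l_loc)

-- ===== PRECONDITION & SPEC =====
def Spec_locate_diffs (data1 : List Int) (data2 : List Int) (out : Int × Int) : Prop := out = locate_diffs_alt data1 data2
instance (data1 : List Int) (data2 : List Int) (out : Int × Int) : Decidable (Spec_locate_diffs data1 data2 out) := by unfold Spec_locate_diffs; infer_instance

-- ===== CLAIM (what is proved, stated in full; the proofs are below) =====
def Claim_equal_locate_diffs : Prop := ∀ (data1 : List Int) (data2 : List Int), Dom_locate_diffs data1 data2 → Spec_locate_diffs data1 data2 (locate_diffs data1 data2)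

-- ===== LEMMAS AND PROOFS =====

-- A's loop body / a "keep the last differing index" fold, used to characterise A
def foldA (d1 d2 : List Int) (L : List Int) (st : Int × Int) : Int × Int :=
  L.foldl
    (fun (st : Int × Int) i =>
      if PySem.List.pyGetD d1 i 0 ≠ PySem.List.pyGetD d2 i 0 then
        ((if st.1 = -1 then i else st.1), i)
      else st) st

def lastD (d1 d2 : List Int) (L : List Int) (acc : Int) : Int :=
  L.foldl (fun acc i => if PySem.List.pyGetD d1 i 0 ≠ PySem.List.pyGetD d2 i 0 then i else acc) acc

theorem foldA_fixed_first (d1 d2 : List Int) (L : List Int) (f l : Int) (hf : f ≠ -1) :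
    foldA d1 d2 L (f, l) = (f, lastD d1 d2 L l) := by
  induction L generalizing l with
  | nil => rfl
  | cons i L ih =>
    simp only [foldA, lastD, List.foldl_cons] at *
    by_cases h : PySem.List.pyGetD d1 i 0 ≠ PySem.List.pyGetD d2 i 0
    · simpa [h, hf] using ih i
    · simpa [h, hf] using ih l

theorem foldA_eq (d1 d2 : List Int) (L : List Int) (hpos : ∀ i ∈ L, (0:Int) ≤ i) :
    foldA d1 d2 L (-1, -1) = (firstDiffScan d1 d2 L, lastD d1 d2 L (-1)) := by
  induction L with
  | nil => rfl
  | cons i L ih =>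
    have hi : (0:Int) ≤ i := hpos i (by simp)
    have hi' : i ≠ -1 := by omega
    by_cases h : PySem.List.pyGetD d1 i 0 ≠ PySem.List.pyGetD d2 i 0
    · have := foldA_fixed_first d1 d2 L i i hi'
      simp only [foldA, lastD, firstDiffScan, List.foldl_cons] at *
      simpa [h, hi'] using this
    · have := ih (fun j hj => hpos j (by simp [hj]))
      simp only [foldA, lastD, firstDiffScan, List.foldl_cons] at *
      simpa [h] using this

theorem firstDiffScan_reverse (d1 d2 : List Int) (L : List Int) :
    firstDiffScan d1 d2 L.reverse = lastD d1 d2 L (-1) := by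
  induction L using List.reverseRecOn with
  | nil => rfl
  | append_singleton L i ih =>
    by_cases h : PySem.List.pyGetD d1 i 0 ≠ PySem.List.pyGetD d2 i 0
    · simp [firstDiffScan, lastD, List.foldl_append, h]
    · have he : PySem.List.pyGetD d1 i 0 = PySem.List.pyGetD d2 i 0 := not_not.mp h
      simpa [firstDiffScan, lastD, List.foldl_append, he] using ih

-- ===== VERDICT (by name: the statement is the Claim_ definition above) =====
theorem locate_diffs_spec : Claim_equal_locate_diffs := by
  intro data1 data2 _
  unfold Spec_locate_diffs locate_diffs locate_diffs_alt
  have hmin : pyMIN (data1.length : Int) (data2.length : Int)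
      = min (data1.length : Int) (data2.length : Int) := by
    unfold pyMIN; omega
  set n := min (data1.length : Int) (data2.length : Int) with hn
  rw [hmin]
  show foldA data1 data2 (PySem.List.pyRange 0 n 1) (-1, -1)
      = (firstDiffScan data1 data2 (PySem.List.pyRange 0 n 1),
         firstDiffScan data1 data2 (PySem.List.pyRange (n - 1) (-1) (-1)))
  have hrev : PySem.List.pyRange (n - 1) (-1) (-1)
      = (PySem.List.pyRange 0 n 1).reverse := by
    have := PySem.List.pyRange_neg_one_eq_reverse (n - 1) (-1)
    simpa using this
  have hpos : ∀ i ∈ PySem.List.pyRange 0 n 1, (0:Int) ≤ i := fun i hi =>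
    ((PySem.List.mem_pyRange_one).1 hi).1
  rw [foldA_eq data1 data2 _ hpos, hrev, firstDiffScan_reverse]
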